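-- pv_equiv track=rewrite | github.com/Airyshtoteles/learnLeetCode | learnLeetCode_remote/Day29/Part4/tower_game.py | min_shots
-- ===== SOURCE A (Python) =====
-- from typing import List
--
-- def min_shots(heights: List[int]) -> int:
--     n = len(heights)
--     if n == 0:
--         return 0
--     removed = [False] * n
--     order = sorted(range(n), key=lambda i: heights[i], reverse=True)
--     shots = 0
--     for i in order:
--         if removed[i]:
--             continue
--         shots += 1
--         removed[i] = True
--         # Left neighbor
--         if i - 1 >= 0 and (not removed[i - 1]) and heights[i - 1] < heights[i]:
--             removed[i - 1] = True
--         # Right neighbor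
--         if i + 1 < n and (not removed[i + 1]) and heights[i + 1] < heights[i]:
--             removed[i + 1] = True
--     return shots
-- ===== SOURCE B (Python) =====
-- def min_shots(heights):
--     n = len(heights)
--     gl = [True] * n
--     for j in range(1, n):
--         gl[j] = not (heights[j - 1] > heights[j] and gl[j - 1])
--     gr = [True] * n
--     for j in range(n - 2, -1, -1):
--         gr[j] = not (heights[j + 1] > heights[j] and gr[j + 1])
--     return sum(1 for j in range(n) if gl[j] and gr[j])
-- ===== Notes on version B (the rewrite author's own statement) =====
-- stated objective: faster
-- what changed: Replaces the sort-by-height-then-simulate greedy with a closed form: a tower is shot iff neither neighbor chain threatens it, computed by one left-to-right and one right-to-left boolean pass, then counted.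
import Mathlib
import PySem

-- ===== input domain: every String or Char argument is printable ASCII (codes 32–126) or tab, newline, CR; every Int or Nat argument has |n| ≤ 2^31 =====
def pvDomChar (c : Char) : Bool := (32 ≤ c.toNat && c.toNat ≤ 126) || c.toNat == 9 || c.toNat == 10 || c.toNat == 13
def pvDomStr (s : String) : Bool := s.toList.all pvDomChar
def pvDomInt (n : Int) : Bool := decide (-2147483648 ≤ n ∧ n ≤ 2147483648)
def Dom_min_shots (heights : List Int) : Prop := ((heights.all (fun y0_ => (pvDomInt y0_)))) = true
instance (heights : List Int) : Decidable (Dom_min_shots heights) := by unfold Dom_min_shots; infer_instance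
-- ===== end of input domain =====

-- B replaces A's sort-then-simulate greedy with a closed form evaluated in two linear
-- boolean passes (objective: faster).

-- ===== PORT A =====
-- literal transliteration of A: sort indices by height descending, then simulate the shots
-- with a `removed` array; all list indices are in range here, so `getD` is exact.
def min_shots (heights : List Int) : Int :=
  let n := heights.length
  if n = 0 then 0
  else
    let order := PySem.List.sorted (List.range n) (fun i => heights.getD i 0) true
    let res := order.foldl (fun (st : List Bool × Int) i =>
      let removed := st.1
      let shots := st.2
      if removed.getD i false then (removed, shots)
      else
        let shots := shots + 1
        let removed := removed.set i true
        let removed :=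
          if 1 ≤ i ∧ ¬(removed.getD (i-1) false = true) ∧ heights.getD (i-1) 0 < heights.getD i 0
          then removed.set (i-1) true else removed
        let removed :=
          if i+1 < n ∧ ¬(removed.getD (i+1) false = true) ∧ heights.getD (i+1) 0 < heights.getD i 0
          then removed.set (i+1) true else removed
        (removed, shots)) (List.replicate n false, 0)
    res.2

-- ===== PORT B =====
-- literal transliteration of Source B: gl/gr boolean arrays built by one forward pass
-- (range(1,n)) and one backward pass (range(n-2,-1,-1)), then a counting pass.
def min_shots_alt (heights : List Int) : Int :=
  let n := heights.length
  let gl := (List.range' 1 (n-1)).foldl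
    (fun gl j => gl.set j (!(decide (heights.getD (j-1) 0 > heights.getD j 0) && gl.getD (j-1) true)))
    (List.replicate n true)
  let gr := ((List.range (n-1)).reverse).foldl
    (fun gr j => gr.set j (!(decide (heights.getD (j+1) 0 > heights.getD j 0) && gr.getD (j+1) true)))
    (List.replicate n true)
  (List.range n).foldl (fun s j => if gl.getD j true && gr.getD j true then s + 1 else s) 0

-- ===== PRECONDITION & SPEC =====
def Spec_min_shots (heights : List Int) (out : Int) : Prop := out = min_shots_alt heights
instance (heights : List Int) (out : Int) : Decidable (Spec_min_shots heights out) := by unfold Spec_min_shots; infer_instance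

-- ===== CLAIM (what is proved, stated in full; the proofs are below) =====
def Claim_equal_min_shots : Prop := ∀ (heights : List Int), Dom_min_shots heights → Spec_min_shots heights (min_shots heights)

-- ===== LEMMAS AND PROOFS =====

def pvGL (H : List Int) : Nat → Bool
  | 0 => true
  | j+1 => !(decide (H.getD j 0 > H.getD (j+1) 0) && pvGL H j)
def pvGRa (H : List Int) : Nat → Bool
  | 0 => true
  | c+1 => !(decide (H.getD (H.length-1-c) 0 > H.getD (H.length-2-c) 0) && pvGRa H c)
def pvGR (H : List Int) (j : Nat) : Bool := pvGRa H (H.length - 1 - j)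
def pvShot (H : List Int) (j : Nat) : Bool := pvGL H j && pvGR H j

theorem pvGR_unfold (H : List Int) (j : Nat) (hj : j + 1 < H.length) :
    pvGR H j = !(decide (H.getD (j+1) 0 > H.getD j 0) && pvGR H (j+1)) := by
  unfold pvGR
  have hc : H.length - 1 - j = (H.length - 1 - (j+1)) + 1 := by omega
  have h1 : H.length - 1 - (H.length - 1 - (j+1)) = j+1 := by omega
  have h2 : H.length - 2 - (H.length - 1 - (j+1)) = j := by omega
  rw [hc]
  simp only [pvGRa, h1, h2]

theorem pvGR_last (H : List Int) (j : Nat) (hj : H.length ≤ j + 1) : pvGR H j = true := by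
  unfold pvGR
  have : H.length - 1 - j = 0 := by omega
  rw [this]; rfl

theorem shot_gl (H : List Int) (j : Nat) (hs : pvShot H j = true) : pvGL H j = true := by
  have := hs; simp only [pvShot, Bool.and_eq_true] at this; exact this.1
theorem shot_gr (H : List Int) (j : Nat) (hs : pvShot H j = true) : pvGR H j = true := by
  have := hs; simp only [pvShot, Bool.and_eq_true] at this; exact this.2

theorem shotL (H : List Int) (j : Nat) (h1 : 1 ≤ j) (hlt : H.getD (j-1) 0 > H.getD j 0)
    (hs : pvShot H (j-1) = true) : pvShot H j = false := by
  obtain ⟨m, rfl⟩ : ∃ m, j = m + 1 := ⟨j - 1, by omega⟩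
  simp only [Nat.add_sub_cancel] at hlt hs
  have hgl : pvGL H m = true := shot_gl H m hs
  have : pvGL H (m+1) = false := by simp only [pvGL, hgl, hlt]; simp
  simp [pvShot, this]

theorem shotR (H : List Int) (j : Nat) (h1 : j + 1 < H.length) (hlt : H.getD (j+1) 0 > H.getD j 0)
    (hs : pvShot H (j+1) = true) : pvShot H j = false := by
  have hgr : pvGR H (j+1) = true := shot_gr H (j+1) hs
  have : pvGR H j = false := by rw [pvGR_unfold H j h1]; simp only [hgr, hlt]; simp
  simp [pvShot, this]

theorem shotFalse (H : List Int) (j : Nat) (hj : j < H.length) (hs : pvShot H j = false) :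
    (1 ≤ j ∧ H.getD (j-1) 0 > H.getD j 0 ∧ pvShot H (j-1) = true) ∨
    (j + 1 < H.length ∧ H.getD (j+1) 0 > H.getD j 0 ∧ pvShot H (j+1) = true) := by
  rcases Bool.and_eq_false_iff.mp hs with hgl | hgr
  · left
    obtain ⟨m, rfl⟩ : ∃ m, j = m + 1 := by
      rcases j with _ | m
      · exact absurd hgl (by simp [pvGL])
      · exact ⟨m, rfl⟩
    have h : (decide (H.getD m 0 > H.getD (m+1) 0) && pvGL H m) = true := by
      have hh := hgl; simp only [pvGL] at hh
      cases hb : (decide (H.getD m 0 > H.getD (m+1) 0) && pvGL H m) <;> simp_all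
    rw [Bool.and_eq_true] at h
    have hlt : H.getD m 0 > H.getD (m+1) 0 := by simpa using h.1
    have hgr1 : pvGR H m = true := by
      rcases Nat.lt_or_ge (m+1) H.length with hm | hm
      · rw [pvGR_unfold H m hm]
        have hd : decide (H.getD (m+1) 0 > H.getD m 0) = false := decide_eq_false (by omega)
        rw [hd, Bool.false_and, Bool.not_false]
      · exact pvGR_last H m hm
    exact ⟨by omega, by simpa using hlt, by simp [pvShot, h.2, hgr1]⟩
  · right
    have hlen : j + 1 < H.length := by
      by_contra hc
      rw [pvGR_last H j (by omega)] at hgr; exact absurd hgr (by simp)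
    rw [pvGR_unfold H j hlen] at hgr
    have h : (decide (H.getD (j+1) 0 > H.getD j 0) && pvGR H (j+1)) = true := by
      cases hb : (decide (H.getD (j+1) 0 > H.getD j 0) && pvGR H (j+1)) <;> simp_all
    rw [Bool.and_eq_true] at h
    have hlt : H.getD (j+1) 0 > H.getD j 0 := by simpa using h.1
    have hgl1 : pvGL H (j+1) = true := by
      have hd : decide (H.getD j 0 > H.getD (j+1) 0) = false := decide_eq_false (by omega)
      simp only [pvGL, hd, Bool.false_and, Bool.not_false]
    exact ⟨hlen, hlt, by simp [pvShot, h.2, hgl1]⟩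

theorem getD_set_bool (l : List Bool) (i j : Nat) (b : Bool) :
    (l.set i b).getD j false = if i = j ∧ i < l.length then b else l.getD j false := by
  by_cases hij : i = j
  · subst hij
    by_cases hl : i < l.length
    · simp [List.getD, List.getElem?_set, hl]
    · simp [List.getD, List.getElem?_set, hl]
  · simp [List.getD, List.getElem?_set, hij]

theorem getD_set_bool' (l : List Bool) (i j : Nat) (b : Bool) :
    (l.set i b).getD j true = if i = j ∧ i < l.length then b else l.getD j true := by
  by_cases hij : i = j
  · subst hij
    by_cases hl : i < l.length
    · simp [List.getD, List.getElem?_set, hl]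
    · simp [List.getD, List.getElem?_set, hl]
  · simp [List.getD, List.getElem?_set, hij]

def pvRem (H : List Int) (P : List Nat) (j : Nat) : Bool :=
  (P.contains j && pvShot H j)
  || (decide (1 ≤ j) && P.contains (j-1) && pvShot H (j-1) && decide (H.getD (j-1) 0 > H.getD j 0))
  || (P.contains (j+1) && pvShot H (j+1) && decide (H.getD (j+1) 0 > H.getD j 0))

theorem contains_append_one (P : List Nat) (i x : Nat) :
    (P ++ [i]).contains x = (P.contains x || decide (x = i)) := by
  simp [List.contains_append]

theorem pvRem_append_dead (H : List Int) (P : List Nat) (i : Nat) (hsi : pvShot H i = false) (j : Nat) :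
    pvRem H (P ++ [i]) j = pvRem H P j := by
  unfold pvRem
  rw [contains_append_one, contains_append_one, contains_append_one]
  by_cases e1 : j = i
  · subst e1
    by_cases hj0 : 1 ≤ j
    · have hne : ¬ (j - 1 = j) := by omega
      simp [hsi, hne]
    · simp [hsi, hj0]
  · by_cases e2 : j - 1 = i
    · by_cases e3 : j + 1 = i
      · omega
      · rw [e2]; simp [e1, e3, hsi]
    · by_cases e3 : j + 1 = i
      · rw [e3]; simp [e1, e2, hsi]
      · simp [e1, e2, e3]

theorem pvRem_append_live (H : List Int) (P : List Nat) (i : Nat) (hsi : pvShot H i = true) (j : Nat) :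
    pvRem H (P ++ [i]) j =
      (pvRem H P j || decide (j = i)
        || (decide (1 ≤ j) && decide (j - 1 = i) && decide (H.getD (j-1) 0 > H.getD j 0))
        || (decide (j + 1 = i) && decide (H.getD (j+1) 0 > H.getD j 0))) := by
  unfold pvRem
  rw [contains_append_one, contains_append_one, contains_append_one]
  by_cases e1 : j = i
  · subst e1
    by_cases hj0 : 1 ≤ j
    · have hne : ¬ (j - 1 = j) := by omega
      have hne2 : ¬ (j + 1 = j) := by omega
      simp [hsi, hne, hne2]
    · have hne2 : ¬ (j + 1 = j) := by omega
      simp [hsi, hj0, hne2]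
  · by_cases e2 : j - 1 = i
    · by_cases e3 : j + 1 = i
      · omega
      · rw [e2]; simp [e1, e2, e3, hsi]
        by_cases hj0 : 1 ≤ j <;> simp [hj0] <;> rw [Bool.eq_iff_iff] <;> simp <;> tauto
    · by_cases e3 : j + 1 = i
      · rw [e3]; simp [e1, e2, e3, hsi]
        rw [Bool.eq_iff_iff]; simp; tauto
      · simp [e1, e2, e3]


def pvR1 (removed : List Bool) (i : Nat) : List Bool := removed.set i true

def pvR2 (H : List Int) (removed : List Bool) (i : Nat) : List Bool :=
  if 1 ≤ i ∧ ¬((pvR1 removed i).getD (i-1) false = true) ∧ H.getD (i-1) 0 < H.getD i 0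
  then (pvR1 removed i).set (i-1) true else pvR1 removed i

def pvR3 (H : List Int) (n : Nat) (removed : List Bool) (i : Nat) : List Bool :=
  if i+1 < n ∧ ¬((pvR2 H removed i).getD (i+1) false = true) ∧ H.getD (i+1) 0 < H.getD i 0
  then (pvR2 H removed i).set (i+1) true else pvR2 H removed i

def pvStepA (H : List Int) (n : Nat) : (List Bool × Int) → Nat → (List Bool × Int) := fun st i =>
  if st.1.getD i false then (st.1, st.2) else (pvR3 H n st.1 i, st.2 + 1)

theorem pvR1_len (removed : List Bool) (i : Nat) : (pvR1 removed i).length = removed.length := by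
  simp [pvR1]

theorem pvR2_len (H : List Int) (removed : List Bool) (i : Nat) :
    (pvR2 H removed i).length = removed.length := by
  unfold pvR2; split <;> simp [pvR1]

theorem pvR3_len (H : List Int) (n : Nat) (removed : List Bool) (i : Nat) :
    (pvR3 H n removed i).length = removed.length := by
  unfold pvR3; split <;> simp [pvR2_len]

theorem pvR1_getD (removed : List Bool) (i j : Nat) (hi : i < removed.length) :
    (pvR1 removed i).getD j false = (removed.getD j false || decide (j = i)) := by
  unfold pvR1
  rw [getD_set_bool]
  by_cases e : i = j
  · subst e; simp [hi]
  · have : ¬ (j = i) := fun h => e h.symm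
    simp [e, this]

theorem pvR2_getD (H : List Int) (removed : List Bool) (i j : Nat) (hi : i < removed.length) :
    (pvR2 H removed i).getD j false =
      ((pvR1 removed i).getD j false || (decide (j + 1 = i) && decide (H.getD j 0 < H.getD i 0))) := by
  unfold pvR2
  by_cases e : j + 1 = i
  · have ej : i - 1 = j := by omega
    have hj : j < (pvR1 removed i).length := by rw [pvR1_len]; omega
    by_cases hlt : H.getD (i-1) 0 < H.getD i 0
    · rw [ej] at hlt ⊢
      by_cases hr : (pvR1 removed i).getD j false = true
      · rw [if_neg (by tauto), hr]; simp
      · rw [if_pos ⟨by omega, hr, hlt⟩, getD_set_bool, if_pos ⟨rfl, hj⟩]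
        simp [e, hlt]
        exact Or.inr hlt
    · rw [ej] at hlt ⊢
      rw [if_neg (by tauto)]
      have hd : decide (H.getD j 0 < H.getD i 0) = false := decide_eq_false hlt
      rw [hd, Bool.and_false, Bool.or_false]
  · have hgoal : (if 1 ≤ i ∧ ¬(pvR1 removed i).getD (i-1) false = true ∧ H.getD (i-1) 0 < H.getD i 0
        then (pvR1 removed i).set (i-1) true else pvR1 removed i).getD j false
        = (pvR1 removed i).getD j false := by
      split
      · rename_i hc
        rw [getD_set_bool, if_neg (by intro hh; exact e (by omega))]
      · rfl
    rw [hgoal]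
    have hd : decide (j + 1 = i) = false := decide_eq_false e
    rw [hd, Bool.false_and, Bool.or_false]

theorem pvR3_getD (H : List Int) (removed : List Bool) (i j : Nat) (hi : i < removed.length)
    (hlenr : removed.length = H.length) (hj : j < H.length) :
    (pvR3 H H.length removed i).getD j false =
      ((pvR2 H removed i).getD j false ||
        (decide (1 ≤ j) && decide (j - 1 = i) && decide (H.getD j 0 < H.getD i 0))) := by
  unfold pvR3
  by_cases e : 1 ≤ j ∧ j - 1 = i
  · have ej : i + 1 = j := by omega
    have hjl : j < (pvR2 H removed i).length := by rw [pvR2_len]; omega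
    by_cases hlt : H.getD (i+1) 0 < H.getD i 0
    · rw [ej] at hlt ⊢
      by_cases hr : (pvR2 H removed i).getD j false = true
      · rw [if_neg (by tauto), hr]; simp
      · rw [if_pos ⟨by omega, hr, hlt⟩, getD_set_bool, if_pos ⟨rfl, hjl⟩]
        simp [e.1, e.2, hlt]
        exact Or.inr hlt
    · rw [ej] at hlt ⊢
      rw [if_neg (by tauto)]
      have hd : decide (H.getD j 0 < H.getD i 0) = false := decide_eq_false hlt
      rw [hd, Bool.and_false, Bool.or_false]
  · have hgoal : (if i+1 < H.length ∧ ¬(pvR2 H removed i).getD (i+1) false = true ∧ H.getD (i+1) 0 < H.getD i 0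
        then (pvR2 H removed i).set (i+1) true else pvR2 H removed i).getD j false
        = (pvR2 H removed i).getD j false := by
      split
      · rename_i hc
        rw [getD_set_bool, if_neg (by intro hh; exact e ⟨by omega, by omega⟩)]
      · rfl
    rw [hgoal]
    have hd : (decide (1 ≤ j) && decide (j - 1 = i)) = false := by
      rcases Decidable.em (1 ≤ j) with h | h
      · have : ¬ (j - 1 = i) := fun hh => e ⟨h, hh⟩
        simp [this]
      · simp [h]
    rw [hd, Bool.false_and, Bool.or_false]

theorem r3_spec (H : List Int) (removed : List Bool) (i j : Nat)
    (hi : i < H.length) (hlen : removed.length = H.length) (hj : j < H.length) :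
    (pvR3 H H.length removed i).getD j false =
      (removed.getD j false || decide (j = i)
        || (decide (1 ≤ j) && decide (j - 1 = i) && decide (H.getD (j-1) 0 > H.getD j 0))
        || (decide (j + 1 = i) && decide (H.getD (j+1) 0 > H.getD j 0))) := by
  have hi' : i < removed.length := by omega
  rw [pvR3_getD H removed i j hi' hlen hj, pvR2_getD H removed i j hi', pvR1_getD removed i j hi']
  have d1 : (decide (j + 1 = i) && decide (H.getD j 0 < H.getD i 0))
      = (decide (j + 1 = i) && decide (H.getD (j+1) 0 > H.getD j 0)) := by
    by_cases e : j + 1 = i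
    · rw [← e]
    · have : decide (j + 1 = i) = false := decide_eq_false e
      rw [this, Bool.false_and, Bool.false_and]
  have d2 : (decide (1 ≤ j) && decide (j - 1 = i) && decide (H.getD j 0 < H.getD i 0))
      = (decide (1 ≤ j) && decide (j - 1 = i) && decide (H.getD (j-1) 0 > H.getD j 0)) := by
    by_cases e : 1 ≤ j ∧ j - 1 = i
    · rw [← e.2]
    · have : (decide (1 ≤ j) && decide (j - 1 = i)) = false := by
        rcases Decidable.em (1 ≤ j) with h | h
        · have : ¬ (j - 1 = i) := fun hh => e ⟨h, hh⟩
          simp [this]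
        · simp [h]
      rw [this, Bool.false_and, Bool.false_and]
  rw [d1, d2]
  rw [Bool.eq_iff_iff]
  simp only [Bool.or_eq_true]
  tauto

theorem stepA_skip (H : List Int) (n : Nat) (st : List Bool × Int) (i : Nat)
    (h : st.1.getD i false = true) : pvStepA H n st i = st := by
  unfold pvStepA; rw [h]; simp

theorem stepA_shoot (H : List Int) (n : Nat) (st : List Bool × Int) (i : Nat)
    (h : st.1.getD i false = false) : pvStepA H n st i = (pvR3 H n st.1 i, st.2 + 1) := by
  unfold pvStepA; rw [h]; simp

theorem invFold (H : List Int) : ∀ (S P : List Nat) (removed : List Bool) (shots : Int),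
    (P ++ S).Nodup →
    (P ++ S).Pairwise (fun a b => H.getD b 0 ≤ H.getD a 0) →
    (∀ i ∈ P ++ S, i < H.length) →
    (∀ k, k < H.length → k ∈ P ++ S) →
    removed.length = H.length →
    (∀ j, j < H.length → removed.getD j false = pvRem H P j) →
    shots = ((P.filter (pvShot H)).length : Int) →
    (S.foldl (pvStepA H H.length) (removed, shots)).2 = (((P ++ S).filter (pvShot H)).length : Int)
  | [], P, removed, shots, hnd, hpw, hsub, hmem, hlen, hrem, hsh => by
      simpa using hsh
  | i :: S', P, removed, shots, hnd, hpw, hsub, hmem, hlen, hrem, hsh => by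
      have hin : i ∈ P ++ i :: S' := by simp
      have hi : i < H.length := hsub i hin
      have hnd' := hnd
      rw [List.nodup_append] at hnd'
      obtain ⟨hndP, hndC, hdisj⟩ := hnd'
      have hiP : i ∉ P := fun h => hdisj i h i (by simp) rfl
      have hcontPi : P.contains i = false := by simpa using hiP
      have hpwC : (i :: S').Pairwise (fun a b => H.getD b 0 ≤ H.getD a 0) :=
        (List.pairwise_append.mp hpw).2.1
      have hle : ∀ b ∈ S', H.getD b 0 ≤ H.getD i 0 := fun b hb =>
        List.rel_of_pairwise_cons hpwC hb
      have htallP : ∀ k, k < H.length → H.getD i 0 < H.getD k 0 → k ∈ P := by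
        intro k hk hgt
        rcases List.mem_append.mp (hmem k hk) with h | h
        · exact h
        · rcases List.mem_cons.mp h with rfl | h
          · omega
          · exact absurd (hle k h) (by omega)
      have happ : P ++ i :: S' = (P ++ [i]) ++ S' := by simp
      rw [List.foldl_cons]
      by_cases hri : removed.getD i false = true
      · have hPi : pvRem H P i = true := by rw [← hrem i hi]; exact hri
        have hsi : pvShot H i = false := by
          unfold pvRem at hPi
          rw [hcontPi, Bool.false_and, Bool.false_or, Bool.or_eq_true] at hPi
          rcases hPi with h2 | h3
          · simp only [Bool.and_eq_true, decide_eq_true_eq] at h2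
            exact shotL H i h2.1.1.1 h2.2 h2.1.2
          · simp only [Bool.and_eq_true, decide_eq_true_eq] at h3
            have hmemP : i + 1 ∈ P := by
              have := h3.1.1
              simpa using this
            have hi1 : i + 1 < H.length := hsub (i+1) (List.mem_append_left _ hmemP)
            exact shotR H i hi1 h3.2 h3.1.2
        rw [stepA_skip _ _ _ _ hri, happ]
        exact invFold H S' (P ++ [i]) removed shots (happ ▸ hnd) (happ ▸ hpw)
          (fun x hx => hsub x (happ ▸ hx)) (fun k hk => happ ▸ hmem k hk) hlen
          (fun j hj => by rw [hrem j hj, ← pvRem_append_dead H P i hsi j])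
          (by rw [hsh]; simp [List.filter_append, hsi])
      · have hri' : removed.getD i false = false := by
          revert hri; cases removed.getD i false <;> simp
        have hsi : pvShot H i = true := by
          by_contra h
          have hf : pvShot H i = false := by revert h; cases pvShot H i <;> simp
          rcases shotFalse H i hi hf with ⟨h1, hgt, hs⟩ | ⟨h1, hgt, hs⟩
          · have hk : i - 1 ∈ P := htallP (i-1) (by omega) hgt
            have hRi : pvRem H P i = true := by
              unfold pvRem
              have c1 : decide (1 ≤ i) = true := by simp [h1]
              have c2 : P.contains (i-1) = true := by simpa using hk
              have c3 : decide (H.getD (i-1) 0 > H.getD i 0) = true := by simpa using hgt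
              rw [c1, c2, c3, hs]
              simp
            rw [hrem i hi, hRi] at hri'
            cases hri'
          · have hk : i + 1 ∈ P := htallP (i+1) h1 hgt
            have hRi : pvRem H P i = true := by
              unfold pvRem
              have c2 : P.contains (i+1) = true := by simpa using hk
              have c3 : decide (H.getD (i+1) 0 > H.getD i 0) = true := by simpa using hgt
              rw [c2, c3, hs]
              simp
            rw [hrem i hi, hRi] at hri'
            cases hri'
        rw [stepA_shoot _ _ _ _ hri', happ]
        refine invFold H S' (P ++ [i]) (pvR3 H H.length removed i) (shots + 1) (happ ▸ hnd)
          (happ ▸ hpw) (fun x hx => hsub x (happ ▸ hx)) (fun k hk => happ ▸ hmem k hk)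
          (by rw [pvR3_len, hlen]) ?_ ?_
        · intro j hj
          rw [r3_spec H removed i j hi hlen hj, pvRem_append_live H P i hsi j, hrem j hj]
        · rw [hsh]
          simp [List.filter_append, hsi]

theorem thmA_core (H : List Int) :
    ((PySem.List.sorted (List.range H.length) (fun i => H.getD i 0) true).foldl
      (pvStepA H H.length) (List.replicate H.length false, 0)).2
      = (((List.range H.length).filter (pvShot H)).length : Int) := by
  set order := PySem.List.sorted (List.range H.length) (fun i => H.getD i 0) true with horder
  have hperm : order.Perm (List.range H.length) := PySem.List.sorted_perm _ _ _
  have hnd : order.Nodup := (hperm.nodup_iff).mpr (List.nodup_range)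
  have hpw : order.Pairwise (fun a b => H.getD b 0 ≤ H.getD a 0) :=
    PySem.List.sorted_pairwise_rev _ _
  have hsub : ∀ i ∈ ([] : List Nat) ++ order, i < H.length := by
    intro i hi
    have : i ∈ List.range H.length := hperm.mem_iff.mp (by simpa using hi)
    simpa using this
  have hmem : ∀ k, k < H.length → k ∈ ([] : List Nat) ++ order := by
    intro k hk
    simpa using hperm.mem_iff.mpr (by simpa using hk)
  have hrem : ∀ j, j < H.length → (List.replicate H.length false).getD j false = pvRem H [] j := by
    intro j hj
    simp [pvRem, List.getD]
  have := invFold H order [] (List.replicate H.length false) 0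
    (by simpa using hnd) (by simpa using hpw) hsub hmem (by simp) hrem (by simp)
  rw [this]
  simp only [List.nil_append]
  have : (order.filter (pvShot H)).length = ((List.range H.length).filter (pvShot H)).length :=
    (hperm.filter _).length_eq
  rw [this]


theorem bridgeA (H : List Int) : min_shots H =
    if H.length = 0 then 0
    else ((PySem.List.sorted (List.range H.length) (fun i => H.getD i 0) true).foldl
      (pvStepA H H.length) (List.replicate H.length false, 0)).2 := rfl

def pvStepGl (H : List Int) : List Bool → Nat → List Bool := fun gl j =>
  gl.set j (!(decide (H.getD (j-1) 0 > H.getD j 0) && gl.getD (j-1) true))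
def pvStepGr (H : List Int) : List Bool → Nat → List Bool := fun gr j =>
  gr.set j (!(decide (H.getD (j+1) 0 > H.getD j 0) && gr.getD (j+1) true))

theorem bridgeB (H : List Int) : min_shots_alt H =
    (List.range H.length).foldl
      (fun s j => if ((List.range' 1 (H.length-1)).foldl (pvStepGl H) (List.replicate H.length true)).getD j true
          && (((List.range (H.length-1)).reverse).foldl (pvStepGr H) (List.replicate H.length true)).getD j true
        then s + 1 else s) 0 := rfl

theorem getD_replicate_true (n j : Nat) : (List.replicate n true).getD j true = true := by
  simp [List.getD, List.getElem?_replicate]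
  split <;> simp

theorem foldl_gl_len (H : List Int) (L : List Nat) (g : List Bool) :
    (L.foldl (pvStepGl H) g).length = g.length := by
  induction L generalizing g with
  | nil => rfl
  | cons x L ih => rw [List.foldl_cons, ih]; simp [pvStepGl]

theorem glInv (H : List Int) : ∀ m, m ≤ H.length - 1 → ∀ j, j < H.length →
    ((List.range' 1 m).foldl (pvStepGl H) (List.replicate H.length true)).getD j true
      = if j ≤ m then pvGL H j else true := by
  intro m
  induction m with
  | zero =>
    intro _ j hj
    rw [show List.range' 1 0 = ([] : List Nat) from rfl, List.foldl_nil, getD_replicate_true]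
    rcases Nat.eq_zero_or_pos j with rfl | hpos
    · simp [pvGL]
    · rw [if_neg (by omega)]
  | succ m ih =>
    intro hm j hj
    rw [List.range'_concat, List.foldl_append, List.foldl_cons, List.foldl_nil,
      (show 1 + 1 * m = 1 + m by omega)]
    set prev := (List.range' 1 m).foldl (pvStepGl H) (List.replicate H.length true) with hprev
    have hplen : prev.length = H.length := by rw [hprev, foldl_gl_len, List.length_replicate]
    have e1 : 1 + m = m + 1 := by omega
    have e2 : m + 1 - 1 = m := by omega
    have hgm : prev.getD m true = pvGL H m := by
      rw [ih (by omega) m (by omega), if_pos (le_refl m)]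
    show (prev.set (1+m) (!(decide (H.getD (1+m-1) 0 > H.getD (1+m) 0) && prev.getD (1+m-1) true))).getD j true = _
    rw [e1, e2, hgm, getD_set_bool']
    by_cases ej : m + 1 = j
    · subst ej
      rw [if_pos ⟨rfl, by omega⟩, if_pos (le_refl _)]
      rfl
    · rw [if_neg (by intro h; exact ej h.1)]
      by_cases hjm : j ≤ m
      · rw [ih (by omega) j hj, if_pos hjm, if_pos (by omega)]
      · rw [ih (by omega) j hj, if_neg hjm, if_neg (by omega)]

theorem grInv (H : List Int) : ∀ k, k ≤ H.length - 1 → ∀ (g : List Bool), g.length = H.length →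
    (∀ j, j < H.length → g.getD j true = if k ≤ j then pvGR H j else true) →
    ∀ j, j < H.length → (((List.range k).reverse).foldl (pvStepGr H) g).getD j true = pvGR H j := by
  intro k
  induction k with
  | zero =>
    intro _ g _ hg j hj
    rw [show (List.range 0).reverse = ([] : List Nat) from rfl, List.foldl_nil, hg j hj,
      if_pos (Nat.zero_le j)]
  | succ k ih =>
    intro hk g hglen hg j hj
    have hrev : (List.range (k+1)).reverse = k :: (List.range k).reverse := by
      simp [List.range_succ]
    rw [hrev, List.foldl_cons]
    have hk1 : k + 1 < H.length := by omega
    have hgk1 : g.getD (k+1) true = pvGR H (k+1) := by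
      rw [hg (k+1) hk1, if_pos (le_refl _)]
    refine ih (by omega) (pvStepGr H g k) (by rw [show pvStepGr H g k = g.set k _ from rfl]; simp [hglen]) ?_ j hj
    intro j' hj'
    show (g.set k (!(decide (H.getD (k+1) 0 > H.getD k 0) && g.getD (k+1) true))).getD j' true = _
    rw [hgk1, getD_set_bool']
    by_cases ej : k = j'
    · subst ej
      rw [if_pos ⟨rfl, by omega⟩, if_pos (le_refl _)]
      rw [pvGR_unfold H k hk1]
    · rw [if_neg (by intro h; exact ej h.1)]
      by_cases hjk : k + 1 ≤ j'
      · rw [hg j' hj', if_pos hjk, if_pos (by omega)]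
      · rw [hg j' hj', if_neg hjk, if_neg (by omega)]

theorem countFold (p q : Nat → Bool) : ∀ (L : List Nat) (s : Int), (∀ j ∈ L, p j = q j) →
    L.foldl (fun s j => if p j then s + 1 else s) s = s + ((L.filter q).length : Int) := by
  intro L
  induction L with
  | nil => intro s _; simp
  | cons x L ih =>
    intro s hpq
    rw [List.foldl_cons, List.filter_cons]
    have hx : p x = q x := hpq x (by simp)
    by_cases hp : p x = true
    · rw [if_pos hp, ih (s+1) (fun j hj => hpq j (by simp [hj])), ← hx, hp]
      simp; ring
    · have hp' : p x = false := by revert hp; cases p x <;> simp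
      rw [if_neg (by simp [hp']), ih s (fun j hj => hpq j (by simp [hj])), ← hx, hp']
      simp

theorem thmB (H : List Int) :
    min_shots_alt H = (((List.range H.length).filter (pvShot H)).length : Int) := by
  rw [bridgeB]
  rw [countFold _ (pvShot H) (List.range H.length) 0 ?_]
  · simp
  · intro j hj
    have hjn : j < H.length := List.mem_range.mp hj
    have hgl : ((List.range' 1 (H.length-1)).foldl (pvStepGl H) (List.replicate H.length true)).getD j true = pvGL H j := by
      rw [glInv H (H.length-1) (le_refl _) j hjn, if_pos (by omega)]
    have hgr : (((List.range (H.length-1)).reverse).foldl (pvStepGr H) (List.replicate H.length true)).getD j true = pvGR H j := by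
      refine grInv H (H.length-1) (le_refl _) (List.replicate H.length true) (by simp) ?_ j hjn
      intro j' hj'
      rw [getD_replicate_true]
      by_cases h : H.length - 1 ≤ j'
      · rw [if_pos h, pvGR_last H j' (by omega)]
      · rw [if_neg h]
    rw [hgl, hgr]
    rfl


-- ===== VERDICT (by name: the statement is the Claim_ definition above) =====
theorem min_shots_spec : Claim_equal_min_shots := by
  intro H _
  unfold Spec_min_shots
  rw [bridgeA]
  by_cases h0 : H.length = 0
  · rw [if_pos h0]
    have : H = [] := List.length_eq_zero_iff.mp h0
    subst this
    rfl
  · rw [if_neg h0, thmA_core H, ← thmB H]
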